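-- pv_equiv track=rewrite | github.com/hunter686868/learning | 8 tasks/cyberpunk_1992.py | massdriver
-- ===== SOURCE A (Python) =====
-- def massdriver(activate: list) -> int:
--     dct = {}
--     lst = []
--     for i in range(len(activate)):
--         if activate[i] in dct:
--             lst.append(dct[activate[i]])
--         else:
--             dct[activate[i]] = i
--     if lst:
--         return min(lst)
--     return -1
-- ===== SOURCE B (Python) =====
-- def massdriver(activate: list) -> int:
--     counts = {}
--     for v in activate:
--         counts[v] = counts.get(v, 0) + 1
--     for i, v in enumerate(activate):
--         if counts[v] > 1:
--             return i
--     return -1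
-- ===== Notes on version B (the rewrite author's own statement) =====
-- stated objective: simpler
-- what changed: A maintains a first-seen-index dict, accumulates the first index of every duplicate occurrence into a list and takes min of it; B first builds a frequency table in one pass and then scans forward once, returning the first index whose value has count > 1 (the minimum automatically), -1 if the scan completes.
import Mathlib
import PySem

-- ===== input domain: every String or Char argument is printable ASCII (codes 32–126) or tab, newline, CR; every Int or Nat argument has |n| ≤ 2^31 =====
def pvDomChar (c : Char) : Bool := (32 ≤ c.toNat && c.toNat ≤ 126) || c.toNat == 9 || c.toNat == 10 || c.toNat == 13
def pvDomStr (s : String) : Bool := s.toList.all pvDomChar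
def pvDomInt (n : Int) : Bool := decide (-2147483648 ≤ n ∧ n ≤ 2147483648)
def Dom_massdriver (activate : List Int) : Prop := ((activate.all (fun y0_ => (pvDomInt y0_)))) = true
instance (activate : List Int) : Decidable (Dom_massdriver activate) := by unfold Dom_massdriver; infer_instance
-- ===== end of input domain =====

-- B replaces A's first-seen-index dict + duplicate-index list + min with a frequency table
-- built in one pass followed by a short-circuiting forward scan (objective: simpler).


-- ===== PORT A =====
def massdriver (activate : List Int) : Int :=
  let r := (PySem.List.pyRange 0 (activate.length : Int) 1).foldl
    (fun (s : PySem.Dict Int Int × List Int) (i : Int) =>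
      let v := PySem.List.pyGetD activate i 0
      if s.1.contains v then (s.1, s.2 ++ [s.1.getD v 0])
      else (s.1.insert v i, s.2))
    (PySem.Dict.empty, [])
  if r.2 ≠ [] then (PySem.List.min? r.2 (fun x => x)).getD 0 else -1

-- ===== PORT B =====
-- the early-returning scan over enumerate(activate)
def massdriverScan (counts : PySem.Dict Int Int) : List (Int × Int) → Int
  | [] => -1
  | (i, v) :: rest => if counts.getD v 0 > 1 then i else massdriverScan counts rest

def massdriver_alt (activate : List Int) : Int :=
  let counts := activate.foldl (fun d v => d.insert v (d.getD v 0 + 1)) PySem.Dict.empty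
  massdriverScan counts (PySem.List.enumerate activate 0)

-- ===== PRECONDITION & SPEC =====
def Spec_massdriver (activate : List Int) (out : Int) : Prop := out = massdriver_alt activate
instance (activate : List Int) (out : Int) : Decidable (Spec_massdriver activate out) := by unfold Spec_massdriver; infer_instance

-- ===== CLAIM (what is proved, stated in full; the proofs are below) =====
def Claim_equal_massdriver : Prop := ∀ (activate : List Int), Dom_massdriver activate → Spec_massdriver activate (massdriver activate)

-- ===== LEMMAS AND PROOFS =====

-- A's loop body, as a step over enumerated pairs
def stepA (s : PySem.Dict Int Int × List Int) (iv : Int × Int) : PySem.Dict Int Int × List Int :=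
  if s.1.contains iv.2 then (s.1, s.2 ++ [s.1.getD iv.2 0]) else (s.1.insert iv.2 iv.1, s.2)

-- A's duplicate-first-index list, computed structurally with the already-seen prefix p
def dupIdxs (p : List Int) : List Int → List Int
  | [] => []
  | v :: t => if v ∈ p then ((p.idxOf v : Int)) :: dupIdxs (p ++ [v]) t else dupIdxs (p ++ [v]) t

-- d is the first-occurrence-index map of the prefix p
def RepMap (p : List Int) (d : PySem.Dict Int Int) : Prop :=
  ∀ v : Int, d.get? v = if v ∈ p then some ((p.idxOf v : Int)) else none

-- B's scan, over a plain suffix with a running index, phrased with the full list's counts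
def firstDup (xs : List Int) : List Int → Int → Int
  | [], _ => -1
  | v :: t, k => if 2 ≤ xs.count v then k else firstDup xs t (k + 1)

theorem massdriver_eq_enum (xs : List Int) :
    massdriver xs =
      (if ((PySem.List.enumerate xs 0).foldl stepA (PySem.Dict.empty, ([] : List Int))).2 ≠ [] then
        (PySem.List.min? ((PySem.List.enumerate xs 0).foldl stepA (PySem.Dict.empty, ([] : List Int))).2
          (fun x => x)).getD 0
      else -1) := by
  rw [PySem.List.enumerate_eq_map_pyRange xs 0, List.foldl_map]
  rfl

theorem rep_empty : RepMap [] PySem.Dict.empty := by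
  intro v; simp [PySem.Dict.get?_empty]

theorem rep_mem {p : List Int} {d : PySem.Dict Int Int} {v : Int}
    (h : RepMap p d) (hv : v ∈ p) : RepMap (p ++ [v]) d := by
  intro w
  rw [h w]
  by_cases hw : w ∈ p
  · rw [if_pos hw, if_pos (by simp [hw]), List.idxOf_append_of_mem hw]
  · rw [if_neg hw, if_neg (by
      simp only [List.mem_append, List.mem_singleton]
      rintro (h1 | rfl) <;> [exact hw h1; exact hw hv])]

theorem rep_insert {p : List Int} {d : PySem.Dict Int Int} {v : Int}
    (h : RepMap p d) (hv : v ∉ p) : RepMap (p ++ [v]) (d.insert v (p.length : Int)) := by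
  intro w
  rw [PySem.Dict.get?_insert]
  by_cases hwv : w = v
  · subst hwv
    rw [if_pos rfl, if_pos (by simp), List.idxOf_append_of_notMem hv]
    simp
  · rw [if_neg hwv, h w]
    by_cases hw : w ∈ p
    · rw [if_pos hw, if_pos (by simp [hw]), List.idxOf_append_of_mem hw]
    · rw [if_neg hw, if_neg (by simp [hw, hwv])]

theorem loopA_snd (s : List Int) : ∀ (p : List Int) (d : PySem.Dict Int Int) (acc : List Int),
    RepMap p d →
    ((PySem.List.enumerate s (p.length : Int)).foldl stepA (d, acc)).2 = acc ++ dupIdxs p s := by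
  induction s with
  | nil =>
    intro p d acc _
    simp only [PySem.List.enumerate_nil, List.foldl_nil, dupIdxs, List.append_nil]
  | cons v t ih =>
    intro p d acc h
    rw [PySem.List.enumerate_cons, List.foldl_cons]
    have hlen : ((p.length : Int) + 1) = (((p ++ [v]).length : Int)) := by
      simp
    by_cases hv : v ∈ p
    · have hcont : d.contains v = true := by
        rw [PySem.Dict.contains_eq_isSome_get?, h v, if_pos hv]; rfl
      have hgetD : d.getD v 0 = (p.idxOf v : Int) := by
        rw [PySem.Dict.getD_eq_get?_getD, h v, if_pos hv]; rfl
      have hstep : stepA (d, acc) ((p.length : Int), v) = (d, acc ++ [(p.idxOf v : Int)]) := by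
        simp [stepA, hcont, hgetD]
      rw [hstep, hlen, ih (p ++ [v]) d (acc ++ [(p.idxOf v : Int)]) (rep_mem h hv)]
      simp [dupIdxs, hv]
    · have hcont : d.contains v = false := by
        rw [PySem.Dict.contains_eq_isSome_get?, h v, if_neg hv]; rfl
      have hstep : stepA (d, acc) ((p.length : Int), v) = (d.insert v (p.length : Int), acc) := by
        simp [stepA, hcont]
      rw [hstep, hlen, ih (p ++ [v]) _ acc (rep_insert h hv)]
      simp [dupIdxs, hv]

theorem mem_dupIdxs (s : List Int) : ∀ (p : List Int) (x : Int),
    x ∈ dupIdxs p s ↔ ∃ v, v ∈ s ∧ 2 ≤ (p ++ s).count v ∧ x = ((p ++ s).idxOf v : Int) := by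
  induction s with
  | nil => intro p x; simp [dupIdxs]
  | cons v t ih =>
    intro p x
    have e : (p ++ [v]) ++ t = p ++ v :: t := by simp
    by_cases hv : v ∈ p
    · rw [dupIdxs, if_pos hv, List.mem_cons, ih (p ++ [v]) x]
      constructor
      · rintro (rfl | ⟨w, hw, hc, rfl⟩)
        · refine ⟨v, List.mem_cons_self .., ?_, ?_⟩
          · rw [List.count_append, List.count_cons_self]
            have : 0 < p.count v := List.count_pos_iff.mpr hv
            omega
          · rw [List.idxOf_append_of_mem hv]
        · rw [e] at hc ⊢
          exact ⟨w, List.mem_cons_of_mem v hw, hc, rfl⟩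
      · rintro ⟨w, hw, hc, rfl⟩
        rcases List.mem_cons.mp hw with rfl | hwt
        · left; rw [List.idxOf_append_of_mem hv]
        · right; exact ⟨w, hwt, by rw [e]; exact hc, by rw [e]⟩
    · rw [dupIdxs, if_neg hv, ih (p ++ [v]) x]
      constructor
      · rintro ⟨w, hw, hc, rfl⟩
        rw [e] at hc ⊢
        exact ⟨w, List.mem_cons_of_mem v hw, hc, rfl⟩
      · rintro ⟨w, hw, hc, rfl⟩
        rcases List.mem_cons.mp hw with rfl | hwt
        · by_cases hvt : w ∈ t
          · exact ⟨w, hvt, by rw [e]; exact hc, by rw [e]⟩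
          · exfalso
            rw [List.count_append, List.count_cons_self,
              List.count_eq_zero.mpr hv, List.count_eq_zero.mpr hvt] at hc
            omega
        · exact ⟨w, hwt, by rw [e]; exact hc, by rw [e]⟩

theorem idxOf_le_of_getElem (xs : List Int) : ∀ (j : Nat) (h : j < xs.length), xs.idxOf (xs[j]) ≤ j := by
  induction xs with
  | nil => intro j h; simp at h
  | cons a t ih =>
    intro j h
    cases j with
    | zero => simp
    | succ j =>
      have hj : j < t.length := by simpa using h
      simp only [List.getElem_cons_succ, List.idxOf_cons]
      by_cases hav : (a == t[j]'hj) = true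
      · simp [hav]
      · simp only [hav, cond_false]
        have := ih j hj
        omega

theorem firstDup_eq_findIdx? (xs : List Int) (s : List Int) : ∀ (k : Int),
    firstDup xs s k = (match s.findIdx? (fun v => decide (2 ≤ xs.count v)) with
      | some j => k + (j : Int) | none => -1) := by
  induction s with
  | nil => intro k; simp [firstDup]
  | cons v t ih =>
    intro k
    rw [List.findIdx?_cons]
    by_cases hv : 2 ≤ xs.count v
    · simp [firstDup, hv]
    · simp only [firstDup, hv, decide_eq_true_eq, if_false]
      rw [ih (k + 1)]
      cases h : t.findIdx? (fun v => decide (2 ≤ xs.count v)) with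
      | none => simp
      | some j => simp; ring

theorem scan_eq_firstDup (xs : List Int) (counts : PySem.Dict Int Int)
    (hc : ∀ v, counts.getD v 0 = (xs.count v : Int)) :
    ∀ (s : List Int) (k : Int), massdriverScan counts (PySem.List.enumerate s k) = firstDup xs s k := by
  intro s
  induction s with
  | nil => intro k; simp [PySem.List.enumerate_nil, massdriverScan, firstDup]
  | cons v t ih =>
    intro k
    rw [PySem.List.enumerate_cons]
    show (if counts.getD v 0 > 1 then k else massdriverScan counts (PySem.List.enumerate t (k + 1))) = _
    rw [hc v, ih (k + 1)]
    by_cases h2 : 2 ≤ xs.count v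
    · rw [if_pos (by exact_mod_cast h2), firstDup, if_pos h2]
    · rw [if_neg (by exact_mod_cast (by omega : ¬ (1 < xs.count v))), firstDup, if_neg h2]

theorem massdriver_alt_eq_firstDup (xs : List Int) : massdriver_alt xs = firstDup xs xs 0 := by
  unfold massdriver_alt
  refine scan_eq_firstDup xs _ ?_ xs 0
  intro v
  rw [PySem.Dict.getD_foldl_insert_add_one]
  simp [PySem.Dict.getD_empty]

theorem dup_min_eq_firstDup (xs : List Int) :
    (if dupIdxs [] xs ≠ [] then (PySem.List.min? (dupIdxs [] xs) (fun x => x)).getD 0 else -1)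
      = firstDup xs xs 0 := by
  rw [firstDup_eq_findIdx? xs xs 0]
  have memL : ∀ x : Int, x ∈ dupIdxs [] xs ↔
      ∃ v, v ∈ xs ∧ 2 ≤ xs.count v ∧ x = (xs.idxOf v : Int) := by
    intro x; simpa using mem_dupIdxs xs [] x
  cases hf : xs.findIdx? (fun v => decide (2 ≤ xs.count v)) with
  | none =>
    have hall := List.findIdx?_eq_none_iff.mp hf
    have hL : dupIdxs [] xs = [] := by
      rw [List.eq_nil_iff_forall_not_mem]
      intro x hx
      obtain ⟨v, hv, hc, _⟩ := (memL x).mp hx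
      have := hall v hv
      simp at this
      omega
    simp [hL]
  | some j =>
    obtain ⟨hjlen, hpj, hmin⟩ := List.findIdx?_eq_some_iff_getElem.mp hf
    have hpj' : 2 ≤ xs.count xs[j] := by simpa using hpj
    have hmin' : ∀ i, i < j → ∀ (hi : i < xs.length), ¬ 2 ≤ xs.count (xs[i]'hi) := by
      intro i hij hi
      have := hmin i hij
      simp at this
      omega
    -- j is the first occurrence of its own value, so ↑j lies in the duplicate list …
    have hidx : xs.idxOf xs[j] = j := by
      have hmem : xs[j] ∈ xs := List.getElem_mem hjlen
      have h1 : xs.idxOf xs[j] < xs.length := List.idxOf_lt_length_iff.mpr hmem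
      have h2 : xs[xs.idxOf xs[j]]'h1 = xs[j] := List.getElem_idxOf h1
      have hle : xs.idxOf xs[j] ≤ j := idxOf_le_of_getElem xs j hjlen
      by_contra hne
      have hlt : xs.idxOf xs[j] < j := by omega
      exact hmin' _ hlt h1 (by rw [h2]; exact hpj')
    have hjL : (j : Int) ∈ dupIdxs [] xs :=
      (memL _).mpr ⟨xs[j], List.getElem_mem hjlen, hpj', by rw [hidx]⟩
    -- … and is a lower bound of it
    have hLlow : ∀ x ∈ dupIdxs [] xs, (j : Int) ≤ x := by
      intro x hx
      obtain ⟨v, hv, hc, rfl⟩ := (memL x).mp hx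
      have h1 : xs.idxOf v < xs.length := List.idxOf_lt_length_iff.mpr hv
      have h2 : xs[xs.idxOf v]'h1 = v := List.getElem_idxOf h1
      by_contra hlt
      push Not at hlt
      have : xs.idxOf v < j := by exact_mod_cast hlt
      exact hmin' _ this h1 (by rw [h2]; exact hc)
    have hne : dupIdxs [] xs ≠ [] := List.ne_nil_of_mem hjL
    rw [if_pos hne]
    cases hm : PySem.List.min? (dupIdxs [] xs) (fun x => x) with
    | none => exact absurd ((PySem.List.min?_eq_none_iff _ _).mp hm) hne
    | some m =>
      have hmem : m ∈ dupIdxs [] xs := by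
        cases hL : dupIdxs [] xs with
        | nil => exact absurd hL hne
        | cons x t =>
          rw [hL, PySem.List.min?_id_cons, Option.some_inj] at hm
          cases PySem.List.foldl_min_mem t x with
          | inl h => simp [← hm, h]
          | inr h => simp [← hm, h]
      have h1 : m ≤ (j : Int) := PySem.List.min?_id_le hm _ hjL
      have h2 : (j : Int) ≤ m := hLlow m hmem
      have : m = (j : Int) := le_antisymm h1 h2
      simp [this]

theorem massdriver_eq_firstDup (xs : List Int) : massdriver xs = firstDup xs xs 0 := by
  rw [massdriver_eq_enum]
  have h2 : ((PySem.List.enumerate xs 0).foldl stepA (PySem.Dict.empty, ([] : List Int))).2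
      = dupIdxs [] xs := by
    simpa using loopA_snd xs [] PySem.Dict.empty [] rep_empty
  rw [h2]
  exact dup_min_eq_firstDup xs

-- ===== VERDICT (by name: the statement is the Claim_ definition above) =====
theorem massdriver_spec : Claim_equal_massdriver := by
  intro activate _
  unfold Spec_massdriver
  rw [massdriver_eq_firstDup, massdriver_alt_eq_firstDup]
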